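-- pv_equiv track=rewrite | github.com/andersbekkevard/algdat | ovinger/oving1/favorite_spot.py | _truth_max_permutations
-- ===== SOURCE A (Python) =====
-- from typing import List, Set
--
-- def _truth_max_permutations(M: List[int]) -> Set[int]:
--     """
--     Unionen av alle sykler med lengde minst 2 i funksjonsgrafen i -> M[i].
--     Selvsløyfer ekskluderes.
--     """
--     n = len(M)
--     color = [0] * n  # 0=unseen, 1=visiting, 2=done
--     stack_pos = [-1] * n
--     stack = []
--     res = set()
--
--     def dfs(u: int):
--         color[u] = 1
--         stack_pos[u] = len(stack)
--         stack.append(u)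
--         v = M[u]
--         if color[v] == 0:
--             dfs(v)
--         elif color[v] == 1:
--             start = stack_pos[v]
--             cycle = stack[start:]
--             if len(cycle) >= 2:
--                 res.update(cycle)
--         stack.pop()
--         stack_pos[u] = -1
--         color[u] = 2
--
--     for i in range(n):
--         if color[i] == 0:
--             dfs(i)
--     return res
-- ===== SOURCE B (Python) =====
-- from typing import List, Set
--
-- def _truth_max_permutations(M: List[int]) -> Set[int]:
--     """
--     Union of all cycles of length >= 2 in the functional graph i -> M[i].
--     Iterative path-walk: follow the chain from each unseen node, recording
--     positions in a single mark array; a cycle is the tail of the path from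
--     the position where the walk closes on itself.
--     """
--     n = len(M)
--     mark = [None] * n  # None = unseen, p >= 0 = position on current path, -1 = finished
--     res = set()
--     for i in range(n):
--         if mark[i] is not None:
--             continue
--         path = []
--         u = i
--         while mark[u] is None:
--             mark[u] = len(path)
--             path.append(u)
--             u = M[u]
--         p = mark[u]
--         if p >= 0 and len(path) - p >= 2:
--             res.update(path[p:])
--         for w in path:
--             mark[w] = -1
--     return res
-- ===== Notes on version B (the rewrite author's own statement) =====
-- stated objective: alternative
-- what changed: A's recursive three-colour DFS (color/stack_pos arrays, an explicit stack, and per-node unwinding on return) is replaced by an iterative chain walk: one mark array records each node's position on the current path, the cycle is read off as the path tail from the closing position, and the whole path is finalised in one batch pass.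
import Mathlib
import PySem

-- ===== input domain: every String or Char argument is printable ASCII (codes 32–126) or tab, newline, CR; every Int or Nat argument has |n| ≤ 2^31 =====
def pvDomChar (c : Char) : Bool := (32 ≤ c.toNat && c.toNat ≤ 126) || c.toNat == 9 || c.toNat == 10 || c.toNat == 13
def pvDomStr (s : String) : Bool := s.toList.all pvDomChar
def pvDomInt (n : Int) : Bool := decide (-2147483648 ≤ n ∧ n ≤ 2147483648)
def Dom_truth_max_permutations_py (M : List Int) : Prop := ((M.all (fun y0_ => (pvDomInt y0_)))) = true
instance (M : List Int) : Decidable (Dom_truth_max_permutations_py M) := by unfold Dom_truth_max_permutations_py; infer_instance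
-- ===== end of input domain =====

-- B replaces A's recursive three-colour DFS by an iterative path walk with a single
-- position-mark array and batch finalisation (objective: alternative; same O(n) cost).

-- ===== PORT A =====
-- state of A's mutable variables: color, stack_pos, stack, res
structure AState where
  color : List Int
  spos : List Int
  stack : List Int
  res : PySem.Set Int

-- def dfs(u): ... ; fuel only makes the recursion total (the recursion depth is
-- bounded by the number of unseen nodes, see countP_zero_lt_fuel reasoning below)
def dfsA (M : List Int) : Nat → Int → AState → AState
  | 0, _, s => s
  | fuel+1, u, s =>
    -- color[u] = 1; stack_pos[u] = len(stack); stack.append(u)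
    let s1 : AState := ⟨PySem.List.pySetD s.color u 1,
                        PySem.List.pySetD s.spos u (PySem.List.len s.stack),
                        s.stack ++ [u], s.res⟩
    let v := PySem.List.pyGetD M u 0
    let s2 : AState :=
      if PySem.List.pyGetD s1.color v 0 = 0 then
        dfsA M fuel v s1
      else if PySem.List.pyGetD s1.color v 0 = 1 then
        -- start = stack_pos[v]; cycle = stack[start:]; if len(cycle) >= 2: res.update(cycle)
        let start := PySem.List.pyGetD s1.spos v 0
        let cycle := PySem.List.slice s1.stack (some start) none
        if 2 ≤ PySem.List.len cycle then
          ⟨s1.color, s1.spos, s1.stack, PySem.Set.update s1.res cycle⟩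
        else s1
      else s1
    -- stack.pop(); stack_pos[u] = -1; color[u] = 2
    ⟨PySem.List.pySetD s2.color u 2, PySem.List.pySetD s2.spos u (-1),
     s2.stack.dropLast, s2.res⟩

def truth_max_permutations_py (M : List Int) : List Int :=
  let n := M.length
  let init : AState := ⟨List.replicate n 0, List.replicate n (-1), [], PySem.Set.empty⟩
  let fin := (PySem.List.pyRange 0 (PySem.List.len M) 1).foldl
    (fun s i => if PySem.List.pyGetD s.color i 0 = 0 then dfsA M (n+1) i s else s) init
  fin.res

-- ===== PORT B =====
-- while mark[u] is None: mark[u] = len(path); path.append(u); u = M[u]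
def walkB (M : List Int) : Nat → Int → List (Option Int) → List Int →
    (List (Option Int) × List Int × Int)
  | 0, u, mark, path => (mark, path, u)
  | fuel+1, u, mark, path =>
    if PySem.List.pyGetD mark u none = none then
      walkB M fuel (PySem.List.pyGetD M u 0)
        (PySem.List.pySetD mark u (some (PySem.List.len path))) (path ++ [u])
    else (mark, path, u)

-- one iteration of B's outer loop: skip seen nodes, walk, record the cycle tail, finish the path
def stepB (M : List Int) (n : Nat) (s : List (Option Int) × PySem.Set Int) (i : Int) :
    List (Option Int) × PySem.Set Int :=
  if PySem.List.pyGetD s.1 i none ≠ none then s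
  else
    let r := walkB M (n+1) i s.1 []
    let res1 :=
      match PySem.List.pyGetD r.1 r.2.2 none with
      | some p =>
        if 0 ≤ p ∧ 2 ≤ PySem.List.len r.2.1 - p then
          PySem.Set.update s.2 (PySem.List.slice r.2.1 (some p) none)
        else s.2
      | none => s.2
    (r.2.1.foldl (fun m w => PySem.List.pySetD m w (some (-1))) r.1, res1)

def truth_max_permutations_py_alt (M : List Int) : List Int :=
  let n := M.length
  ((PySem.List.pyRange 0 (PySem.List.len M) 1).foldl (stepB M n)
    (List.replicate n none, PySem.Set.empty)).2

-- ===== PRECONDITION & SPEC =====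
-- Pre_ excludes exactly the inputs on which A raises IndexError: an entry that is
-- not a valid (possibly negative, Python-style) index into M itself.
def Pre_truth_max_permutations_py (M : List Int) : Prop :=
  ∀ v ∈ M, -(M.length : Int) ≤ v ∧ v < (M.length : Int)
instance (M : List Int) : Decidable (Pre_truth_max_permutations_py M) := by
  unfold Pre_truth_max_permutations_py; infer_instance

def pvWitness_truth_max_permutations_py : List Int := [1, 0, 2, -3]

def Spec_truth_max_permutations_py (M : List Int) (out : List Int) : Prop :=
  out = truth_max_permutations_py_alt M
instance (M : List Int) (out : List Int) : Decidable (Spec_truth_max_permutations_py M out) := by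
  unfold Spec_truth_max_permutations_py; infer_instance

-- ===== CLAIM (what is proved, stated in full; the proofs are below) =====
def Claim_equal_truth_max_permutations_py : Prop :=
  ∀ (M : List Int), Dom_truth_max_permutations_py M →
    Pre_truth_max_permutations_py M →
    Spec_truth_max_permutations_py M (truth_max_permutations_py M)

-- ===== LEMMAS AND PROOFS =====

-- normalised (Python-style, wraparound) index into a list of length n
def nIdx (n : Nat) (i : Int) : Nat := if 0 ≤ i then i.toNat else n - (-i).toNat

theorem nIdx_lt (n : Nat) (i : Int) (h1 : -(n : Int) ≤ i) (h2 : i < (n : Int)) :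
    nIdx n i < n := by unfold nIdx; split <;> omega

theorem pyIdx?_eq_nIdx (n : Nat) (i : Int) (h1 : -(n : Int) ≤ i) (h2 : i < (n : Int)) :
    PySem.List.pyIdx? n i = some (nIdx n i) := by
  simp only [PySem.List.pyIdx?, nIdx]
  split_ifs <;> simp_all

theorem pyGetD_nIdx {α : Type} (xs : List α) (i : Int) (d : α)
    (h1 : -(xs.length : Int) ≤ i) (h2 : i < (xs.length : Int)) :
    PySem.List.pyGetD xs i d = xs.getD (nIdx xs.length i) d := by
  simp [PySem.List.pyGetD, PySem.List.pyGet?, pyIdx?_eq_nIdx _ _ h1 h2, List.getD]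

theorem pySetD_nIdx {α : Type} (xs : List α) (i : Int) (v : α)
    (h1 : -(xs.length : Int) ≤ i) (h2 : i < (xs.length : Int)) :
    PySem.List.pySetD xs i v = xs.set (nIdx xs.length i) v := by
  simp [PySem.List.pySetD, PySem.List.pySet?, pyIdx?_eq_nIdx _ _ h1 h2]

theorem getD_set_ne {α : Type} (xs : List α) (k : Nat) (v : α) (j : Nat) (d : α) (h : j ≠ k) :
    (xs.set k v).getD j d = xs.getD j d := by
  simp [List.getD, List.getElem?_set_ne (by omega : k ≠ j)]

theorem getD_set_self {α : Type} (xs : List α) (k : Nat) (v : α) (d : α) (h : k < xs.length) :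
    (xs.set k v).getD k d = v := by
  simp [List.getD, h]

theorem getD_replicate {α : Type} (n j : Nat) (c d : α) (h : j < n) :
    (List.replicate n c).getD j d = c := by
  simp [List.getD, h]

theorem mem_map_index {α : Type} (xs : List α) (f : α → Nat) (j : Nat) (h : j ∈ xs.map f) :
    ∃ k, ∃ hk : k < xs.length, f (xs[k]'hk) = j := by
  rw [List.mem_map] at h; obtain ⟨a, ha, e⟩ := h
  rw [List.mem_iff_getElem] at ha; obtain ⟨k, hk, e2⟩ := ha
  exact ⟨k, hk, by rw [e2, e]⟩

theorem countP_set_one_lt (xs : List Int) (k : Nat) (hk : k < xs.length)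
    (h0 : xs.getD k 0 = 0) :
    (xs.set k 1).countP (fun c => c == 0) < xs.countP (fun c => c == 0) := by
  have hx : xs[k] = 0 := by simpa [List.getD, List.getElem?_eq_getElem hk] using h0
  have := List.countP_set (p := fun c => c == (0:Int)) (l := xs) (a := (1:Int)) hk
  have hpos : 0 < xs.countP (fun c => c == (0:Int)) :=
    List.countP_pos_iff.mpr ⟨xs[k], List.getElem_mem hk, by simp [hx]⟩
  simp [hx] at this; omega

-- pointwise description of B's finishing fold (mark[w] = -1 for w in path)
theorem finish_fold (n : Nat) :
    ∀ (path : List Int) (mark : List (Option Int)), mark.length = n →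
    (∀ x ∈ path, -(n : Int) ≤ x ∧ x < (n : Int)) →
    (path.foldl (fun m w => PySem.List.pySetD m w (some (-1))) mark).length = n ∧
    (∀ j, j < n →
      (path.foldl (fun m w => PySem.List.pySetD m w (some (-1))) mark).getD j none =
        if j ∈ path.map (nIdx n) then some (-1) else mark.getD j none) := by
  intro path
  induction path with
  | nil => intro mark hl _; exact ⟨by simpa using hl, fun j _ => by simp⟩
  | cons x p ih =>
    intro mark hl hin
    have hx := hin x (by simp)
    have hset : PySem.List.pySetD mark x (some (-1)) = mark.set (nIdx n x) (some (-1)) := by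
      rw [pySetD_nIdx mark x _ (by rw [hl]; exact hx.1) (by rw [hl]; exact hx.2), hl]
    have hlen : (mark.set (nIdx n x) (some (-1))).length = n := by simp [hl]
    obtain ⟨ih1, ih2⟩ := ih (mark.set (nIdx n x) (some (-1))) hlen
      (fun y hy => hin y (by simp [hy]))
    refine ⟨by simpa [hset] using ih1, fun j hj => ?_⟩
    rw [List.foldl_cons, hset, ih2 j hj]
    by_cases hjp : j ∈ p.map (nIdx n)
    · simp [hjp]
    · by_cases hjx : j = nIdx n x
      · subst hjx
        rw [getD_set_self _ _ _ _ (by rw [hl]; exact nIdx_lt n x hx.1 hx.2)]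
        simp [hjp]
      · rw [getD_set_ne _ _ _ _ _ hjx]
        simp [hjp, hjx]

theorem pyGetD_len {α : Type} (xs : List α) (n : Nat) (h : xs.length = n) (i : Int) (d : α)
    (h1 : -(n : Int) ≤ i) (h2 : i < (n : Int)) :
    PySem.List.pyGetD xs i d = xs.getD (nIdx n i) d := by
  subst h; exact pyGetD_nIdx xs i d h1 h2

theorem pySetD_len {α : Type} (xs : List α) (n : Nat) (h : xs.length = n) (i : Int) (v : α)
    (h1 : -(n : Int) ≤ i) (h2 : i < (n : Int)) :
    PySem.List.pySetD xs i v = xs.set (nIdx n i) v := by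
  subst h; exact pySetD_nIdx xs i v h1 h2

theorem getD_mem_of_lt {α : Type} (xs : List α) (j : Nat) (d : α) (h : j < xs.length) :
    xs.getD j d ∈ xs := by
  rw [List.getD, List.getElem?_eq_getElem h]; exact List.getElem_mem h

-- the result-set update B performs after the walk, as a function of the terminal mark value
def resUpd (res : PySem.Set Int) (L : List Int) (o : Option Int) : PySem.Set Int :=
  match o with
  | some p =>
    if 0 ≤ p ∧ 2 ≤ PySem.List.len L - p then
      PySem.Set.update res (PySem.List.slice L (some p) none)
    else res
  | none => res

theorem resUpd_some (res : PySem.Set Int) (L : List Int) (p : Int) :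
    resUpd res L (some p) =
      (if 0 ≤ p ∧ 2 ≤ PySem.List.len L - p then
        PySem.Set.update res (PySem.List.slice L (some p) none)
      else res) := rfl

theorem walkB_stop (M : List Int) (fuel : Nat) (u : Int) (mark : List (Option Int))
    (path : List Int) (h : PySem.List.pyGetD mark u none ≠ none) :
    walkB M fuel u mark path = (mark, path, u) := by
  cases fuel with
  | zero => rfl
  | succ fuel => rw [walkB, if_neg h]

-- ===== main simulation lemma: A's dfs versus B's walk =====
theorem dfs_walk (M : List Int) (n : Nat) (hn : n = M.length)
    (hM : ∀ v ∈ M, -(n : Int) ≤ v ∧ v < (n : Int)) :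
    ∀ (fuel : Nat) (u : Int) (color spos stack : List Int) (res : PySem.Set Int)
      (mark : List (Option Int)),
    color.length = n → spos.length = n → mark.length = n →
    (∀ x ∈ stack, -(n : Int) ≤ x ∧ x < (n : Int)) →
    (∀ k (hk : k < stack.length), spos.getD (nIdx n (stack[k]'hk)) 0 = (k : Int)) →
    (∀ j, j < n → (color.getD j 0 = 1 ↔ j ∈ stack.map (nIdx n))) →
    (∀ j, j < n → color.getD j 0 = 0 → spos.getD j 0 = -1) →
    (∀ j, j < n → mark.getD j none =
      (if color.getD j 0 = 0 then none
       else if color.getD j 0 = 1 then some (spos.getD j 0) else some (-1))) →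
    (-(n : Int) ≤ u ∧ u < (n : Int)) → color.getD (nIdx n u) 0 = 0 →
    color.countP (fun c => c == 0) < fuel →
    ∃ (newN : List Int) (mark' : List (Option Int)) (w : Int) (color' spos' : List Int),
      walkB M fuel u mark stack = (mark', stack ++ newN, w) ∧
      dfsA M fuel u ⟨color, spos, stack, res⟩ =
        ⟨color', spos', stack,
          resUpd res (stack ++ newN) (PySem.List.pyGetD mark' w none)⟩ ∧
      color'.length = n ∧ spos'.length = n ∧ mark'.length = n ∧
      (∀ x ∈ newN, -(n : Int) ≤ x ∧ x < (n : Int)) ∧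
      (∀ j ∈ newN.map (nIdx n), color.getD j 0 = 0) ∧
      (∀ j, j < n → color'.getD j 0 = if j ∈ newN.map (nIdx n) then 2 else color.getD j 0) ∧
      (∀ j, j < n → spos'.getD j 0 = spos.getD j 0) ∧
      (∀ j, j < n → j ∉ newN.map (nIdx n) → mark'.getD j none = mark.getD j none) ∧
      (∀ k (hk : k < (stack ++ newN).length), stack.length ≤ k →
        mark'.getD (nIdx n ((stack ++ newN)[k]'hk)) none = some (k : Int)) := by
  intro fuel
  induction fuel with
  | zero =>
    intro u color spos stack res mark _ _ _ _ _ _ _ _ _ _ hcount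
    omega
  | succ fuel ih =>
    intro u color spos stack res mark hlc hls hlm hstk hpos hgrey hwhite hrel hu h0 hcount
    have hjun : nIdx n u < n := nIdx_lt n u hu.1 hu.2
    have hC1 : PySem.List.pySetD color u 1 = color.set (nIdx n u) 1 :=
      pySetD_len color n hlc u 1 hu.1 hu.2
    have hS1 : PySem.List.pySetD spos u (PySem.List.len stack)
        = spos.set (nIdx n u) ((stack.length : Int)) := by
      rw [PySem.List.len_eq]; exact pySetD_len spos n hls u _ hu.1 hu.2
    have hM1 : PySem.List.pySetD mark u (some (PySem.List.len stack))
        = mark.set (nIdx n u) (some ((stack.length : Int))) := by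
      rw [PySem.List.len_eq]; exact pySetD_len mark n hlm u _ hu.1 hu.2
    have hvv : PySem.List.pyGetD M u 0 = M.getD (nIdx n u) 0 :=
      pyGetD_len M n hn.symm u 0 hu.1 hu.2
    have hvmem : M.getD (nIdx n u) 0 ∈ M :=
      getD_mem_of_lt M _ 0 (by rw [← hn]; exact hjun)
    have hvr : -(n : Int) ≤ PySem.List.pyGetD M u 0 ∧ PySem.List.pyGetD M u 0 < (n : Int) := by
      rw [hvv]; exact hM _ hvmem
    have hjvn : nIdx n (PySem.List.pyGetD M u 0) < n := nIdx_lt n _ hvr.1 hvr.2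
    -- the state after dfs's entry statements / one step of B's while loop
    have hlc1 : (color.set (nIdx n u) 1).length = n := by simp [hlc]
    have hls1 : (spos.set (nIdx n u) ((stack.length : Int))).length = n := by simp [hls]
    have hlm1 : (mark.set (nIdx n u) (some ((stack.length : Int)))).length = n := by simp [hlm]
    have hstk1 : ∀ x ∈ stack ++ [u], -(n : Int) ≤ x ∧ x < (n : Int) := by
      intro x hx
      rcases List.mem_append.mp hx with h | h
      · exact hstk x h
      · rw [List.mem_singleton] at h; subst h; exact hu
    have hjustack : nIdx n u ∉ stack.map (nIdx n) := by
      intro hmem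
      have := (hgrey _ hjun).mpr hmem
      rw [h0] at this
      exact absurd this (by decide)
    have hmap1 : (stack ++ [u]).map (nIdx n) = stack.map (nIdx n) ++ [nIdx n u] := by simp
    have hpos1 : ∀ k (hk : k < (stack ++ [u]).length),
        (spos.set (nIdx n u) ((stack.length : Int))).getD (nIdx n ((stack ++ [u])[k]'hk)) 0
          = (k : Int) := by
      intro k hk
      by_cases hlt : k < stack.length
      · have he : (stack ++ [u])[k]'hk = stack[k]'hlt := List.getElem_append_left _
        rw [he]
        have hne : nIdx n (stack[k]'hlt) ≠ nIdx n u := by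
          intro he2
          exact hjustack (he2 ▸ List.mem_map_of_mem (List.getElem_mem hlt))
        rw [getD_set_ne _ _ _ _ _ hne]
        exact hpos k hlt
      · have hke : k = stack.length := by
          have := hk; simp only [List.length_append, List.length_cons, List.length_nil] at this
          omega
        subst hke
        have he : (stack ++ [u])[stack.length]'hk = u := by simp
        rw [he]
        exact getD_set_self _ _ _ _ (by rw [hls]; exact hjun)
    have hgrey1 : ∀ j, j < n → ((color.set (nIdx n u) 1).getD j 0 = 1 ↔
        j ∈ (stack ++ [u]).map (nIdx n)) := by
      intro j hj
      rw [hmap1, List.mem_append, List.mem_singleton]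
      by_cases hje : j = nIdx n u
      · subst hje
        rw [getD_set_self _ _ _ _ (by rw [hlc]; exact hjun)]
        simp
      · rw [getD_set_ne _ _ _ _ _ hje, hgrey j hj]
        simp [hje]
    have hwhite1 : ∀ j, j < n → (color.set (nIdx n u) 1).getD j 0 = 0 →
        (spos.set (nIdx n u) ((stack.length : Int))).getD j 0 = -1 := by
      intro j hj hjw
      have hje : j ≠ nIdx n u := by
        intro he; subst he
        rw [getD_set_self _ _ _ _ (by rw [hlc]; exact hjun)] at hjw
        exact absurd hjw (by decide)
      rw [getD_set_ne _ _ _ _ _ hje] at hjw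
      rw [getD_set_ne _ _ _ _ _ hje]
      exact hwhite j hj hjw
    have hrel1 : ∀ j, j < n →
        (mark.set (nIdx n u) (some ((stack.length : Int)))).getD j none =
        (if (color.set (nIdx n u) 1).getD j 0 = 0 then none
         else if (color.set (nIdx n u) 1).getD j 0 = 1 then
           some ((spos.set (nIdx n u) ((stack.length : Int))).getD j 0)
         else some (-1)) := by
      intro j hj
      by_cases hje : j = nIdx n u
      · subst hje
        rw [getD_set_self _ _ _ _ (by rw [hlm]; exact hjun),
            getD_set_self _ _ _ _ (by rw [hlc]; exact hjun),
            getD_set_self _ _ _ _ (by rw [hls]; exact hjun)]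
        simp
      · rw [getD_set_ne _ _ _ _ _ hje, getD_set_ne _ _ _ _ _ hje,
            getD_set_ne _ _ _ _ _ hje]
        exact hrel j hj
    have hmarku : PySem.List.pyGetD mark u none = none := by
      rw [pyGetD_len mark n hlm u none hu.1 hu.2, hrel _ hjun, if_pos h0]
    have hwalkstep : walkB M (fuel+1) u mark stack =
        walkB M fuel (PySem.List.pyGetD M u 0)
          (mark.set (nIdx n u) (some ((stack.length : Int)))) (stack ++ [u]) := by
      rw [walkB, if_pos hmarku, hM1]
    have hGuard : PySem.List.pyGetD (color.set (nIdx n u) 1) (PySem.List.pyGetD M u 0) 0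
        = (color.set (nIdx n u) 1).getD (nIdx n (PySem.List.pyGetD M u 0)) 0 :=
      pyGetD_len _ n hlc1 _ 0 hvr.1 hvr.2
    by_cases hA : (color.set (nIdx n u) 1).getD (nIdx n (PySem.List.pyGetD M u 0)) 0 = 0
    · -- unseen successor: dfs recurses, the walk continues
      have hcount1 : (color.set (nIdx n u) 1).countP (fun c => c == 0) < fuel := by
        have := countP_set_one_lt color (nIdx n u) (by rw [hlc]; exact hjun) h0
        omega
      obtain ⟨newN', mark', w, c2, s2, ihw, ihd, ihlc, ihls, ihlm, ihbnd, ihwhiteN,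
        ihc, ihs, ihm, ihpos⟩ :=
        ih (PySem.List.pyGetD M u 0) (color.set (nIdx n u) 1)
          (spos.set (nIdx n u) ((stack.length : Int))) (stack ++ [u]) res
          (mark.set (nIdx n u) (some ((stack.length : Int))))
          hlc1 hls1 hlm1 hstk1 hpos1 hgrey1 hwhite1 hrel1 hvr hA hcount1
      have happ : (stack ++ [u]) ++ newN' = stack ++ (u :: newN') := by simp
      have hjuw : nIdx n u ∉ newN'.map (nIdx n) := by
        intro hmem
        have := ihwhiteN _ hmem
        rw [getD_set_self _ _ _ _ (by rw [hlc]; exact hjun)] at this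
        exact absurd this (by decide)
      refine ⟨u :: newN', mark', w, c2.set (nIdx n u) 2, s2.set (nIdx n u) (-1),
        ?_, ?_, ?_, ?_, ?_, ?_, ?_, ?_, ?_, ?_, ?_⟩
      · rw [hwalkstep, ihw, happ]
      · simp only [dfsA]
        rw [hC1, hS1, hGuard, if_pos hA, ihd]
        rw [pySetD_len c2 n ihlc u 2 hu.1 hu.2, pySetD_len s2 n ihls u (-1) hu.1 hu.2]
        rw [List.dropLast_concat, happ]
      · simp [ihlc]
      · simp [ihls]
      · exact ihlm
      · intro x hx
        rcases List.mem_cons.mp hx with h | h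
        · subst h; exact hu
        · exact ihbnd x h
      · intro j hmem
        rw [List.map_cons, List.mem_cons] at hmem
        rcases hmem with h | h
        · subst h; exact h0
        · have hje : j ≠ nIdx n u := by
            intro he; subst he; exact hjuw h
          have := ihwhiteN j h
          rw [getD_set_ne _ _ _ _ _ hje] at this
          exact this
      · intro j hj
        by_cases hje : j = nIdx n u
        · subst hje
          rw [getD_set_self _ _ _ _ (by rw [ihlc]; exact hjun)]
          simp
        · rw [getD_set_ne _ _ _ _ _ hje, ihc j hj, getD_set_ne _ _ _ _ _ hje]
          simp [hje]
      · intro j hj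
        by_cases hje : j = nIdx n u
        · subst hje
          rw [getD_set_self _ _ _ _ (by rw [ihls]; exact hjun)]
          exact (hwhite _ hjun h0).symm
        · rw [getD_set_ne _ _ _ _ _ hje, ihs j hj, getD_set_ne _ _ _ _ _ hje]
      · intro j hj hmem
        rw [List.map_cons, List.mem_cons] at hmem
        push Not at hmem
        rw [ihm j hj hmem.2, getD_set_ne _ _ _ _ _ hmem.1]
      · intro k hk hks
        have hk' : k < ((stack ++ [u]) ++ newN').length := by rw [happ]; exact hk
        have hel : ((stack ++ [u]) ++ newN')[k]'hk' = (stack ++ (u :: newN'))[k]'hk :=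
          List.getElem_of_eq happ hk'
        by_cases hke : k = stack.length
        · subst hke
          have he2 : (stack ++ (u :: newN'))[stack.length]'hk = u := by
            rw [List.getElem_append_right (by omega)]
            simp
          rw [he2]
          rw [ihm _ hjun hjuw, getD_set_self _ _ _ _ (by rw [hlm]; exact hjun)]
        · have hks1 : (stack ++ [u]).length ≤ k := by
            simp only [List.length_append, List.length_cons, List.length_nil]; omega
          have := ihpos k hk' hks1
          rw [hel] at this
          exact this
    · -- seen successor: dfs records the cycle (if grey and long enough) and returns,
      -- the walk stops
      have hwstop : walkB M fuel (PySem.List.pyGetD M u 0)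
          (mark.set (nIdx n u) (some ((stack.length : Int)))) (stack ++ [u]) =
          ((mark.set (nIdx n u) (some ((stack.length : Int)))), stack ++ [u],
            PySem.List.pyGetD M u 0) := by
        apply walkB_stop
        rw [pyGetD_len _ n hlm1 _ none hvr.1 hvr.2, hrel1 _ hjvn]
        split
        · exact absurd (by assumption) hA
        · split <;> simp
      have hGmark : PySem.List.pyGetD (mark.set (nIdx n u) (some ((stack.length : Int))))
          (PySem.List.pyGetD M u 0) none =
          (mark.set (nIdx n u) (some ((stack.length : Int)))).getD
            (nIdx n (PySem.List.pyGetD M u 0)) none :=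
        pyGetD_len _ n hlm1 _ none hvr.1 hvr.2
      refine ⟨[u], mark.set (nIdx n u) (some ((stack.length : Int))),
        PySem.List.pyGetD M u 0,
        (color.set (nIdx n u) 1).set (nIdx n u) 2,
        (spos.set (nIdx n u) ((stack.length : Int))).set (nIdx n u) (-1),
        ?_, ?_, ?_, ?_, ?_, ?_, ?_, ?_, ?_, ?_, ?_⟩
      · rw [hwalkstep, hwstop]
      · by_cases hB : (color.set (nIdx n u) 1).getD (nIdx n (PySem.List.pyGetD M u 0)) 0 = 1
        · -- grey: a cycle is closed here
          obtain ⟨k0, hk0, hk0e⟩ := mem_map_index (stack ++ [u]) (nIdx n) _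
            ((hgrey1 _ hjvn).mp hB)
          have hsposv : (spos.set (nIdx n u) ((stack.length : Int))).getD
              (nIdx n (PySem.List.pyGetD M u 0)) 0 = (k0 : Int) := by
            rw [← hk0e]; exact hpos1 k0 hk0
          have hlen1 : PySem.List.len (PySem.List.slice (stack ++ [u]) (some (k0 : Int)) none)
              = (((stack ++ [u]).length - k0 : Nat) : Int) := by
            rw [PySem.List.slice_from_natCast, PySem.List.len_eq, List.length_drop]
          simp only [dfsA]
          rw [hC1, hS1, hGuard, if_neg hA, if_pos hB]
          rw [pyGetD_len _ n hls1 _ 0 hvr.1 hvr.2, hsposv]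
          rw [hGmark, hrel1 _ hjvn, if_neg hA, if_pos hB, hsposv, resUpd_some]
          by_cases hbig : k0 + 2 ≤ (stack ++ [u]).length
          · rw [if_pos (by rw [hlen1]; omega),
               if_pos (by rw [PySem.List.len_eq]; exact ⟨by omega, by omega⟩)]
            simp only []
            rw [pySetD_len _ n hlc1 u 2 hu.1 hu.2, pySetD_len _ n hls1 u (-1) hu.1 hu.2,
                List.dropLast_concat]
          · rw [if_neg (by rw [hlen1]; intro hcon; omega),
               if_neg (by rw [PySem.List.len_eq]; intro hcon; have := hcon.2; omega)]
            simp only []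
            rw [pySetD_len _ n hlc1 u 2 hu.1 hu.2, pySetD_len _ n hls1 u (-1) hu.1 hu.2,
                List.dropLast_concat]
        · -- finished: no cycle through here
          simp only [dfsA]
          rw [hC1, hS1, hGuard, if_neg hA, if_neg hB]
          rw [hGmark, hrel1 _ hjvn, if_neg hA, if_neg hB, resUpd_some]
          rw [if_neg (by intro hcon; exact absurd hcon.1 (by decide))]
          simp only []
          rw [pySetD_len _ n hlc1 u 2 hu.1 hu.2, pySetD_len _ n hls1 u (-1) hu.1 hu.2,
              List.dropLast_concat]
      · simp [hlc]
      · simp [hls]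
      · simp [hlm]
      · intro x hx; rw [List.mem_singleton] at hx; subst hx; exact hu
      · intro j hmem
        have : j = nIdx n u := by simpa using hmem
        subst this; exact h0
      · intro j hj
        by_cases hje : j = nIdx n u
        · subst hje
          rw [getD_set_self _ _ _ _ (by rw [hlc1]; exact hjun)]
          simp
        · rw [getD_set_ne _ _ _ _ _ hje, getD_set_ne _ _ _ _ _ hje]
          simp [hje]
      · intro j hj
        by_cases hje : j = nIdx n u
        · subst hje
          rw [getD_set_self _ _ _ _ (by rw [hls1]; exact hjun)]
          exact (hwhite _ hjun h0).symm
        · rw [getD_set_ne _ _ _ _ _ hje, getD_set_ne _ _ _ _ _ hje]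
      · intro j hj hmem
        have hje : j ≠ nIdx n u := by intro he; exact hmem (by simp [he])
        rw [getD_set_ne _ _ _ _ _ hje]
      · intro k hk hks
        have hke : k = stack.length := by
          have := hk; simp only [List.length_append, List.length_cons, List.length_nil] at this
          omega
        subst hke
        have he2 : (stack ++ [u])[stack.length]'hk = u := by simp
        rw [he2, getD_set_self _ _ _ _ (by rw [hlm]; exact hjun)]

-- ===== outer loop =====
theorem loop_eq (M : List Int) (n : Nat) (hn : n = M.length)
    (hM : ∀ v ∈ M, -(n : Int) ≤ v ∧ v < (n : Int)) :
    ∀ (L : List Int) (color spos : List Int) (mark : List (Option Int))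
      (res : PySem.Set Int),
    color.length = n → spos.length = n → mark.length = n →
    (∀ i ∈ L, 0 ≤ i ∧ i < (n : Int)) →
    (∀ j, j < n → color.getD j 0 = 0 ∨ color.getD j 0 = 2) →
    (∀ j, j < n → color.getD j 0 = 0 → spos.getD j 0 = -1) →
    (∀ j, j < n → mark.getD j none =
      (if color.getD j 0 = 0 then none
       else if color.getD j 0 = 1 then some (spos.getD j 0) else some (-1))) →
    (L.foldl (fun s i => if PySem.List.pyGetD s.color i 0 = 0 then dfsA M (n+1) i s else s)
        (⟨color, spos, [], res⟩ : AState)).res =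
      (L.foldl (stepB M n) (mark, res)).2 := by
  intro L
  induction L with
  | nil => intro _ _ _ _ _ _ _ _ _ _ _; rfl
  | cons i L' ihL =>
    intro color spos mark res hlc hls hlm hL hnogrey hwhite hrel
    have hi := hL i (List.mem_cons_self ..)
    have hui : -(n : Int) ≤ i ∧ i < (n : Int) := ⟨by omega, hi.2⟩
    have hjin : nIdx n i < n := nIdx_lt n i hui.1 hui.2
    have hGc : PySem.List.pyGetD color i 0 = color.getD (nIdx n i) 0 :=
      pyGetD_len color n hlc i 0 hui.1 hui.2
    have hGm : PySem.List.pyGetD mark i none = mark.getD (nIdx n i) none :=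
      pyGetD_len mark n hlm i none hui.1 hui.2
    simp only [List.foldl_cons]
    by_cases hskip : color.getD (nIdx n i) 0 = 0
    · -- unseen start node: both sides run a full walk from i
      have hgrey0 : ∀ j, j < n → (color.getD j 0 = 1 ↔ j ∈ ([] : List Int).map (nIdx n)) := by
        intro j hj
        simp only [List.map_nil, List.not_mem_nil, iff_false]
        intro h1
        rcases hnogrey j hj with h | h <;> rw [h1] at h <;> exact absurd h (by decide)
      obtain ⟨newN, mark', w, color', spos', hw, hd, hlc', hls', hlm', hbnd, hwhiteN,
        hc, hs, hm, _⟩ :=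
        dfs_walk M n hn hM (n+1) i color spos [] res mark hlc hls hlm (by simp)
          (by intro k hk; simp at hk) hgrey0 hwhite hrel hui hskip
          (by have := List.countP_le_length (p := fun c => (c : Int) == 0) (l := color); omega)
      simp only [List.nil_append] at hw hd
      have hmarki : PySem.List.pyGetD mark i none = none := by
        rw [hGm, hrel _ hjin, if_pos hskip]
      have hstepA : (if PySem.List.pyGetD (⟨color, spos, [], res⟩ : AState).color i 0 = 0
          then dfsA M (n+1) i ⟨color, spos, [], res⟩ else ⟨color, spos, [], res⟩)
          = ⟨color', spos', [], resUpd res newN (PySem.List.pyGetD mark' w none)⟩ := by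
        rw [if_pos (by rw [show (⟨color, spos, [], res⟩ : AState).color = color from rfl, hGc]; exact hskip)]
        exact hd
      have hstepB : stepB M n (mark, res) i =
          (newN.foldl (fun m w => PySem.List.pySetD m w (some (-1))) mark',
           resUpd res newN (PySem.List.pyGetD mark' w none)) := by
        rw [stepB, if_neg (by simp [hmarki])]
        simp only [hw]
        cases ho : PySem.List.pyGetD mark' w none with
        | none => simp [resUpd]
        | some p => simp [resUpd]
      rw [hstepA, hstepB]
      obtain ⟨hlenF, hgetF⟩ := finish_fold n newN mark' hlm' hbnd
      apply ihL color' spos' _ _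
      · exact hlc'
      · exact hls'
      · exact hlenF
      · intro x hx; exact hL x (List.mem_cons_of_mem _ hx)
      · intro j hj
        rw [hc j hj]
        by_cases hmem : j ∈ newN.map (nIdx n)
        · rw [if_pos hmem]; right; rfl
        · rw [if_neg hmem]; exact hnogrey j hj
      · intro j hj hj0
        rw [hc j hj] at hj0
        by_cases hmem : j ∈ newN.map (nIdx n)
        · rw [if_pos hmem] at hj0; exact absurd hj0 (by decide)
        · rw [if_neg hmem] at hj0
          rw [hs j hj]
          exact hwhite j hj hj0
      · intro j hj
        rw [hgetF j hj, hc j hj, hs j hj]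
        by_cases hmem : j ∈ newN.map (nIdx n)
        · rw [if_pos hmem, if_pos hmem]
          norm_num
        · rw [if_neg hmem, if_neg hmem, hm j hj hmem]
          exact hrel j hj
    · -- already finished start node: both sides skip
      have hmarki : PySem.List.pyGetD mark i none ≠ none := by
        rw [hGm, hrel _ hjin, if_neg hskip]
        split <;> simp
      rw [show (if PySem.List.pyGetD (⟨color, spos, [], res⟩ : AState).color i 0 = 0
          then dfsA M (n+1) i ⟨color, spos, [], res⟩ else ⟨color, spos, [], res⟩)
          = ⟨color, spos, [], res⟩ from
        if_neg (by rw [show (⟨color, spos, [], res⟩ : AState).color = color from rfl, hGc]; exact hskip)]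
      rw [show stepB M n (mark, res) i = (mark, res) from by rw [stepB, if_pos hmarki]]
      exact ihL color spos mark res hlc hls hlm (fun x hx => hL x (List.mem_cons_of_mem _ hx)) hnogrey hwhite hrel

-- ===== VERDICT (by name: the statement is the Claim_ definition above) =====
theorem truth_max_permutations_py_spec : Claim_equal_truth_max_permutations_py := by
  intro M _ hPre
  unfold Spec_truth_max_permutations_py
  unfold truth_max_permutations_py truth_max_permutations_py_alt
  have := loop_eq M M.length rfl (by exact_mod_cast hPre)
    (PySem.List.pyRange 0 (PySem.List.len M) 1)
    (List.replicate M.length 0) (List.replicate M.length (-1))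
    (List.replicate M.length none) PySem.Set.empty
    (by simp) (by simp) (by simp)
    (fun i hi => by
      rw [PySem.List.len_eq, PySem.List.mem_pyRange_one] at hi; exact hi)
    (fun j hj => Or.inl (getD_replicate _ _ _ _ hj))
    (fun j hj => fun _ => getD_replicate _ _ _ _ hj)
    (fun j hj => by rw [getD_replicate _ _ _ _ hj, getD_replicate _ _ _ _ hj]; simp)
  simpa using this
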